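-- pv_equiv track=rewrite | github.com/Janardhan-66/SkillCraftTechnology | Task2.py | decrypt_image
-- ===== SOURCE A (Python) =====
-- def decrypt_image(encrypted_data):
--     # Reverse the encryption steps
--     decrypted_data = encrypted_data[:]
--
--     key = 42
--     for i in range(0, len(decrypted_data), 3):
--         # Swap first and last bytes in each RGB triplet back to original
--         if i + 2 < len(decrypted_data):
--             decrypted_data[i], decrypted_data[i + 2] = decrypted_data[i + 2], decrypted_data[i]
--
--         # Reverse the XOR operation with the key
--         decrypted_data[i] ^= key
--         if i + 1 < len(decrypted_data):
--             decrypted_data[i + 1] ^= key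
--         if i + 2 < len(decrypted_data):
--             decrypted_data[i + 2] ^= key
--
--     return decrypted_data
-- ===== SOURCE B (Python) =====
-- def decrypt_image(encrypted_data):
--     # Closed-form index permutation: output position j reads input position
--     # src(j) and XORs with the key. Inside a complete triplet the first and
--     # last positions trade places (src = base + (2 - r)); the middle position
--     # and any trailing incomplete triplet read straight through (src = j).
--     # No mutation, no strided in-place loop: one comprehension over positions.
--     key = 42
--     n = len(encrypted_data)
--
--     def src(j):
--         r = j % 3
--         if r != 1 and j - r + 3 <= n:
--             return j - r + (2 - r)
--         return j
--
--     return [encrypted_data[src(j)] ^ key for j in range(n)]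
-- ===== Notes on version B (the rewrite author's own statement) =====
-- stated objective: alternative
-- what changed: Replaces the in-place strided mutation loop (swap ends of each triplet, then three guarded XOR statements) by a closed-form index permutation: the output is one comprehension over positions, each reading source position src(j) (first/last of a complete triplet traded, everything else identity) and XORing with the key.
import Mathlib
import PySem

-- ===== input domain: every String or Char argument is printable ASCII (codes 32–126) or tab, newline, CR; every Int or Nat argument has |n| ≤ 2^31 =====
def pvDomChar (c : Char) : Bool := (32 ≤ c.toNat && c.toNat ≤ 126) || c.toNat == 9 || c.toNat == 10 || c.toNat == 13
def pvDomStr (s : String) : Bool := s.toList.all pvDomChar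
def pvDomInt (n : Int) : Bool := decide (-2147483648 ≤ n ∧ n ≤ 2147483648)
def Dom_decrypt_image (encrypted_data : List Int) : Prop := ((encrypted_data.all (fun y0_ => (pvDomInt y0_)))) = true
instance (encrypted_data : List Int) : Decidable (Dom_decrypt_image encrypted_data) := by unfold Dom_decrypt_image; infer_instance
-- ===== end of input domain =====

-- B replaces A's in-place strided mutation (swap + three guarded XORs) by a
-- closed-form index permutation applied in one comprehension; same cost, alternative form.

-- ===== PORT A =====
-- 'if i + 2 < len(d): d[i], d[i+2] = d[i+2], d[i]' (both right-hand sides read the old list)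
def pvSwap (d : List Int) (i : Nat) : List Int :=
  if i + 2 < d.length then (d.set i (d.getD (i+2) 0)).set (i+2) (d.getD i 0) else d

-- 'd[j] ^= key' with key = 42
def pvXorAt (d : List Int) (j : Nat) : List Int :=
  d.set j (PySem.Int.bxor (d.getD j 0) 42)

-- 'if j < len(d): d[j] ^= key'
def pvXorIf (d : List Int) (j : Nat) : List Int :=
  if j < d.length then pvXorAt d j else d

-- one iteration of A's for-loop body at index i
def pvBodyA (d : List Int) (i : Nat) : List Int :=
  pvXorIf (pvXorIf (pvXorAt (pvSwap d i) i) (i+1)) (i+2)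

theorem pvSwap_length (d : List Int) (i : Nat) : (pvSwap d i).length = d.length := by
  unfold pvSwap; split <;> simp

theorem pvXorAt_length (d : List Int) (j : Nat) : (pvXorAt d j).length = d.length := by
  simp [pvXorAt]

theorem pvXorIf_length (d : List Int) (j : Nat) : (pvXorIf d j).length = d.length := by
  unfold pvXorIf; split <;> simp [pvXorAt_length]

theorem pvBodyA_length (d : List Int) (i : Nat) : (pvBodyA d i).length = d.length := by
  simp [pvBodyA, pvXorIf_length, pvXorAt_length, pvSwap_length]

-- the for-loop 'for i in range(0, len(decrypted_data), 3)': the body preserves the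
-- length, so iterating while i < the current length is exact
def pvLoopA (d : List Int) (i : Nat) : List Int :=
  if _h : i < d.length then pvLoopA (pvBodyA d i) (i + 3) else d
termination_by d.length - i
decreasing_by simp only [pvBodyA_length]; omega

def decrypt_image (encrypted_data : List Int) : List Int :=
  pvLoopA encrypted_data 0

-- ===== PORT B =====
-- Source B's src(j): position j of the output reads input position src(j)
-- (first/last of a complete triplet traded, identity otherwise)
def pvSrc (n j : Nat) : Nat :=
  if j % 3 ≠ 1 ∧ j - j % 3 + 3 ≤ n then j - j % 3 + (2 - j % 3) else j

-- '[encrypted_data[src(j)] ^ key for j in range(n)]'; src(j) < n always, so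
-- the in-range list read is exact as getD
def decrypt_image_alt (encrypted_data : List Int) : List Int :=
  (List.range encrypted_data.length).map
    (fun j => PySem.Int.bxor (encrypted_data.getD (pvSrc encrypted_data.length j) 0) 42)

-- ===== PRECONDITION & SPEC =====
def Spec_decrypt_image (encrypted_data : List Int) (out : List Int) : Prop := out = decrypt_image_alt encrypted_data
instance (encrypted_data : List Int) (out : List Int) : Decidable (Spec_decrypt_image encrypted_data out) := by unfold Spec_decrypt_image; infer_instance

-- ===== CLAIM (what is proved, stated in full; the proofs are below) =====
def Claim_equal_decrypt_image : Prop := ∀ (encrypted_data : List Int), Dom_decrypt_image encrypted_data → Spec_decrypt_image encrypted_data (decrypt_image encrypted_data)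

-- ===== LEMMAS AND PROOFS =====

theorem pv_set_append_right (p l : List Int) (k : Nat) (v : Int) :
    (p ++ l).set (p.length + k) v = p ++ l.set k v := by
  induction p with
  | nil => simp
  | cons x xs ih => simp [Nat.succ_add, ih]

theorem pv_getD_append_right (p l : List Int) (k : Nat) :
    (p ++ l).getD (p.length + k) 0 = l.getD k 0 := by
  rw [List.getD_append_right _ _ _ _ (Nat.le_add_right _ _)]
  simp

-- the three loop-body primitives, computed one full or partial chunk past p
theorem pvSwap_chunk (p : List Int) (a b c : Int) (rest : List Int) :
    pvSwap (p ++ a :: b :: c :: rest) p.length = p ++ c :: b :: a :: rest := by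
  have hg0 : (p ++ a :: b :: c :: rest).getD p.length 0 = a := by
    simpa using pv_getD_append_right p (a :: b :: c :: rest) 0
  have hg2 : (p ++ a :: b :: c :: rest).getD (p.length + 2) 0 = c := by
    simpa using pv_getD_append_right p (a :: b :: c :: rest) 2
  have hs0 : (p ++ a :: b :: c :: rest).set p.length c = p ++ c :: b :: c :: rest := by
    simpa using pv_set_append_right p (a :: b :: c :: rest) 0 c
  have hs2 : (p ++ c :: b :: c :: rest).set (p.length + 2) a = p ++ c :: b :: a :: rest := by
    simpa using pv_set_append_right p (c :: b :: c :: rest) 2 a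
  have hc : p.length + 2 < (p ++ a :: b :: c :: rest).length := by simp
  rw [pvSwap, if_pos hc, hg0, hg2, hs0, hs2]

theorem pvSwap_short (p l : List Int) (h : l.length ≤ 2) :
    pvSwap (p ++ l) p.length = p ++ l := by
  have : ¬ p.length + 2 < (p ++ l).length := by simp; omega
  rw [pvSwap, if_neg this]

theorem pvXorAt_chunk0 (p : List Int) (x : Int) (t : List Int) :
    pvXorAt (p ++ x :: t) p.length = p ++ PySem.Int.bxor x 42 :: t := by
  have hg : (p ++ x :: t).getD p.length 0 = x := by
    simpa using pv_getD_append_right p (x :: t) 0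
  have hs : (p ++ x :: t).set p.length (PySem.Int.bxor x 42)
      = p ++ PySem.Int.bxor x 42 :: t := by
    simpa using pv_set_append_right p (x :: t) 0 (PySem.Int.bxor x 42)
  rw [pvXorAt, hg, hs]

theorem pvXorIf_chunk1 (p : List Int) (x y : Int) (t : List Int) :
    pvXorIf (p ++ x :: y :: t) (p.length + 1) = p ++ x :: PySem.Int.bxor y 42 :: t := by
  have hg : (p ++ x :: y :: t).getD (p.length + 1) 0 = y := by
    simpa using pv_getD_append_right p (x :: y :: t) 1
  have hs : (p ++ x :: y :: t).set (p.length + 1) (PySem.Int.bxor y 42)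
      = p ++ x :: PySem.Int.bxor y 42 :: t := by
    simpa using pv_set_append_right p (x :: y :: t) 1 (PySem.Int.bxor y 42)
  have hc : p.length + 1 < (p ++ x :: y :: t).length := by simp
  rw [pvXorIf, if_pos hc, pvXorAt, hg, hs]

theorem pvXorIf_chunk2 (p : List Int) (x y z : Int) (t : List Int) :
    pvXorIf (p ++ x :: y :: z :: t) (p.length + 2)
      = p ++ x :: y :: PySem.Int.bxor z 42 :: t := by
  have hg : (p ++ x :: y :: z :: t).getD (p.length + 2) 0 = z := by
    simpa using pv_getD_append_right p (x :: y :: z :: t) 2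
  have hs : (p ++ x :: y :: z :: t).set (p.length + 2) (PySem.Int.bxor z 42)
      = p ++ x :: y :: PySem.Int.bxor z 42 :: t := by
    simpa using pv_set_append_right p (x :: y :: z :: t) 2 (PySem.Int.bxor z 42)
  have hc : p.length + 2 < (p ++ x :: y :: z :: t).length := by simp
  rw [pvXorIf, if_pos hc, pvXorAt, hg, hs]

theorem pvXorIf_skip (p l : List Int) (k : Nat) (h : l.length ≤ k) :
    pvXorIf (p ++ l) (p.length + k) = p ++ l := by
  have : ¬ p.length + k < (p ++ l).length := by simp; omega
  rw [pvXorIf, if_neg this]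

-- B's comprehension on the empty / 1- / 2-element list
theorem alt_nil : decrypt_image_alt [] = [] := by decide

theorem alt_one (a : Int) : decrypt_image_alt [a] = [PySem.Int.bxor a 42] := by
  simp [decrypt_image_alt, pvSrc, List.range_succ]

theorem alt_two (a b : Int) :
    decrypt_image_alt [a, b] = [PySem.Int.bxor a 42, PySem.Int.bxor b 42] := by
  simp [decrypt_image_alt, pvSrc, List.range_succ]

theorem pvSrc_shift (m j : Nat) : pvSrc (m + 3) (j + 3) = pvSrc m j + 3 := by
  unfold pvSrc
  have h3 : (j + 3) % 3 = j % 3 := by omega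
  have hle : j % 3 ≤ j := Nat.mod_le _ _
  have hlt : j % 3 < 3 := Nat.mod_lt _ (by omega)
  rw [h3]
  split_ifs with h1 h2 h2 <;> omega

theorem pvGetD3 (a b c : Int) (rest : List Int) (k : Nat) :
    (a :: b :: c :: rest).getD (k + 3) 0 = rest.getD k 0 := by
  simp

-- B's comprehension peels a complete triplet: reverse-then-XOR, recurse
theorem alt_cons3 (a b c : Int) (rest : List Int) :
    decrypt_image_alt (a :: b :: c :: rest)
      = PySem.Int.bxor c 42 :: PySem.Int.bxor b 42 :: PySem.Int.bxor a 42
          :: decrypt_image_alt rest := by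
  unfold decrypt_image_alt
  have hlen : (a :: b :: c :: rest).length = 3 + rest.length := by simp; omega
  rw [hlen, List.range_add, List.map_append, List.map_map]
  show _ ++ _ = [PySem.Int.bxor c 42, PySem.Int.bxor b 42, PySem.Int.bxor a 42]
      ++ (List.range rest.length).map
        (fun j => PySem.Int.bxor (rest.getD (pvSrc rest.length j) 0) 42)
  refine congrArg₂ (· ++ ·) ?_ ?_
  · rw [show List.range 3 = [0, 1, 2] from by decide]
    have h0 : pvSrc (3 + rest.length) 0 = 2 := by simp [pvSrc]
    have h1 : pvSrc (3 + rest.length) 1 = 1 := by simp [pvSrc]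
    have h2 : pvSrc (3 + rest.length) 2 = 0 := by simp [pvSrc]
    simp [h0, h1, h2]
  · apply List.map_congr_left
    intro j _
    have hs : pvSrc (3 + rest.length) (3 + j) = pvSrc rest.length j + 3 := by
      rw [Nat.add_comm 3 rest.length, Nat.add_comm 3 j]
      exact pvSrc_shift rest.length j
    simp only [Function.comp]
    rw [Nat.add_comm 3 j] at hs ⊢
    rw [hs, pvGetD3]

-- A's loop, started at offset p.length on p ++ l, leaves p untouched and
-- computes B's permutation-XOR of l
theorem pvLoopA_chunks (n : Nat) (l p : List Int) (hn : l.length ≤ n) :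
    pvLoopA (p ++ l) p.length = p ++ decrypt_image_alt l := by
  induction n generalizing l p with
  | zero =>
    have : l = [] := by cases l <;> simp_all
    subst this
    rw [pvLoopA]; simp [alt_nil]
  | succ n ih =>
    match l with
    | [] => rw [pvLoopA]; simp [alt_nil]
    | [a] =>
      rw [pvLoopA]
      have hlt : p.length < (p ++ [a]).length := by simp
      rw [dif_pos hlt]
      have hbody : pvBodyA (p ++ [a]) p.length = p ++ [PySem.Int.bxor a 42] := by
        rw [pvBodyA, pvSwap_short p [a] (by simp), pvXorAt_chunk0,
            pvXorIf_skip p [PySem.Int.bxor a 42] 1 (by simp),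
            pvXorIf_skip p [PySem.Int.bxor a 42] 2 (by simp)]
      rw [hbody, pvLoopA]
      have : ¬ p.length + 3 < (p ++ [PySem.Int.bxor a 42]).length := by simp
      rw [dif_neg this]
      simp [alt_one]
    | [a, b] =>
      rw [pvLoopA]
      have hlt : p.length < (p ++ [a, b]).length := by simp
      rw [dif_pos hlt]
      have hbody : pvBodyA (p ++ [a, b]) p.length
          = p ++ [PySem.Int.bxor a 42, PySem.Int.bxor b 42] := by
        rw [pvBodyA, pvSwap_short p [a, b] (by simp), pvXorAt_chunk0, pvXorIf_chunk1,
            pvXorIf_skip p [PySem.Int.bxor a 42, PySem.Int.bxor b 42] 2 (by simp)]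
      rw [hbody, pvLoopA]
      have : ¬ p.length + 3 < (p ++ [PySem.Int.bxor a 42, PySem.Int.bxor b 42]).length := by
        simp
      rw [dif_neg this]
      simp [alt_two]
    | a :: b :: c :: rest =>
      rw [pvLoopA]
      have hlt : p.length < (p ++ a :: b :: c :: rest).length := by simp
      rw [dif_pos hlt]
      have hbody : pvBodyA (p ++ a :: b :: c :: rest) p.length
          = (p ++ [PySem.Int.bxor c 42, PySem.Int.bxor b 42, PySem.Int.bxor a 42]) ++ rest := by
        rw [pvBodyA, pvSwap_chunk, pvXorAt_chunk0, pvXorIf_chunk1, pvXorIf_chunk2]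
        simp
      rw [hbody]
      have hoff : p.length + 3
          = (p ++ [PySem.Int.bxor c 42, PySem.Int.bxor b 42, PySem.Int.bxor a 42]).length := by
        simp
      rw [hoff, ih rest _ (by simp at hn ⊢; omega)]
      rw [alt_cons3]
      simp

-- ===== VERDICT (by name: the statement is the Claim_ definition above) =====
theorem decrypt_image_spec : Claim_equal_decrypt_image := by
  intro encrypted_data _
  unfold Spec_decrypt_image decrypt_image
  simpa using pvLoopA_chunks encrypted_data.length encrypted_data [] le_rfl
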